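-- pv_equiv track=rewrite | github.com/GrandArchTemplar/infochemistry-dm-2023 | rgr1-upd (Stepanova).py | check_M
-- ===== SOURCE A (Python) =====
-- def check_M(table, n_vars):
--     for i in range(len(table) - 1):
--         for j in range(i + 1, len(table)):
--             binary_i = format(i, f'0{n_vars}b')
--             binary_j = format(j, f'0{n_vars}b')
--             if all(bit_i <= bit_j for bit_i, bit_j in zip(binary_i, binary_j)):
--                 if table[i] > table[j]:
--                     return False
--     return True
-- ===== SOURCE B (Python) =====
-- def check_M(table, n_vars):
--     # Monotone iff no covering pair (indices differing in exactly one bit) decreases: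
--     # transitivity of the submask order makes checking covering pairs sufficient.
--     for j in range(len(table)):
--         for k in range(j.bit_length()):
--             if (j >> k) & 1 and table[j ^ (1 << k)] > table[j]:
--                 return False
--     return True
-- ===== Notes on version B (the rewrite author's own statement) =====
-- stated objective: faster
-- what changed: Instead of testing the submask condition on all O(n^2) index pairs via formatted bit strings, B checks only the n*log(n) covering pairs (indices differing in exactly one bit); transitivity of the submask order makes this sufficient.
-- outside the precondition, e.g. on check_M([0, 1, 0], 1): A returns False, B returns True
import Mathlib
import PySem

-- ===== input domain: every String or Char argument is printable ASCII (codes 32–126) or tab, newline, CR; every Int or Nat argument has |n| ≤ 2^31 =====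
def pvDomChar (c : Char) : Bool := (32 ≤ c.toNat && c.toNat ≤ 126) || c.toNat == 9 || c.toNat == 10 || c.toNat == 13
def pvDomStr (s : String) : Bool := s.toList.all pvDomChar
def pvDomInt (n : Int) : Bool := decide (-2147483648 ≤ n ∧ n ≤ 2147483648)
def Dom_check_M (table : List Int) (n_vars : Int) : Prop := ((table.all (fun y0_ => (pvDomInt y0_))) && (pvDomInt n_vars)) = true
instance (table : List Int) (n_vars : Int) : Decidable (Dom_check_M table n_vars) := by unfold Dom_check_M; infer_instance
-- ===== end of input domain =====

-- B replaces A's all-pairs submask scan by a scan of covering pairs only (asymptotically faster);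
-- Pre_ restricts to the natural truth-table domain (at most 2^n_vars rows, or a trivial table).


-- ===== PORT A =====
-- format(i, f'0{w}b'): exact for 0 ≤ w and i < 2^w, which Pre_ guarantees for every index A
-- formats; built MSB-first by a tail-recursive loop (k counts the remaining positions) so the
-- port evaluates without deepening the stack on wide format specifiers.
def fmtLoop (i : Nat) (w : Nat) : Nat → List Char → List Char
  | 0, acc => acc
  | k+1, acc => fmtLoop i w k ((if i.testBit (w - (k+1)) then '1' else '0') :: acc)

def pyFormatB (w : Int) (i : Nat) : List Char := fmtLoop i w.toNat w.toNat []

-- all(bit_i <= bit_j for bit_i, bit_j in zip(s_i, s_j)): zip's simultaneous walk, short-circuiting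
def zipAllLe : List Char → List Char → Bool
  | x :: xs, y :: ys => if x ≤ y then zipAllLe xs ys else false
  | _, _ => true

def check_M (table : List Int) (n_vars : Int) : Bool :=
  (List.range (table.length - 1)).all (fun i =>
    (List.range' (i + 1) (table.length - (i + 1))).all (fun j =>
      if zipAllLe (pyFormatB n_vars i) (pyFormatB n_vars j) then
        !decide (table.getD i 0 > table.getD j 0)
      else true))

-- ===== PORT B =====
def check_M_alt (table : List Int) (n_vars : Int) : Bool :=
  (List.range table.length).all (fun j =>
    (List.range (Nat.size j)).all (fun k =>
      !(j.testBit k && decide (table.getD (j ^^^ (1 <<< k)) 0 > table.getD j 0))))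

-- ===== PRECONDITION & SPEC =====
-- Pre_ restricts to the natural domain of a truth table over n_vars variables (≤ 2^n_vars rows;
-- trivial tables of ≤ 1 row compare no pair, so any n_vars is fine there): beyond 2^n_vars rows
-- A's zip truncates binary strings of unequal widths and compares high-bit prefixes, an artefact
-- of the formatting; and for n_vars < 0 with ≥ 2 rows A raises ValueError.
def Pre_check_M (table : List Int) (n_vars : Int) : Prop :=
  table.length ≤ 1 ∨ (0 ≤ n_vars ∧ Nat.size (table.length - 1) ≤ n_vars.toNat)
instance (table : List Int) (n_vars : Int) : Decidable (Pre_check_M table n_vars) := by unfold Pre_check_M; infer_instance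
def pvWitness_check_M : List Int × Int := ([0, 1, 0, 1], 2)

def Spec_check_M (table : List Int) (n_vars : Int) (out : Bool) : Prop := out = check_M_alt table n_vars
instance (table : List Int) (n_vars : Int) (out : Bool) : Decidable (Spec_check_M table n_vars out) := by unfold Spec_check_M; infer_instance

-- ===== CLAIM (what is proved, stated in full; the proofs are below) =====
def Claim_equal_check_M : Prop := ∀ (table : List Int) (n_vars : Int), Dom_check_M table n_vars → Pre_check_M table n_vars → Spec_check_M table n_vars (check_M table n_vars)

-- ===== LEMMAS AND PROOFS =====

-- submask basics
lemma or_eq_iff_testBit (i j : Nat) : i ||| j = j ↔ ∀ b, i.testBit b = true → j.testBit b = true := by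
  constructor
  · intro h b hb
    have := congrArg (fun x => x.testBit b) h
    simpa [Nat.testBit_or, hb] using this
  · intro h
    apply Nat.eq_of_testBit_eq
    intro b
    rw [Nat.testBit_or]
    cases hi : i.testBit b
    · simp
    · simp [h b hi]

lemma testBit_false_of_lt {i w b : Nat} (h : i < 2 ^ w) (hb : w ≤ b) : i.testBit b = false := by
  apply Nat.testBit_lt_two_pow
  exact lt_of_lt_of_le h (Nat.pow_le_pow_right (by norm_num) hb)

lemma xor_pow_submask {j b : Nat} (hb : j.testBit b = true) : (j ^^^ 2 ^ b) ||| j = j := by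
  rw [or_eq_iff_testBit]
  intro c hc
  rw [Nat.testBit_xor, Nat.testBit_two_pow] at hc
  by_cases h : b = c
  · subst h; simp [hb] at hc
  · simpa [h] using hc

lemma xor_pow_lt {j b : Nat} (hb : j.testBit b = true) : j ^^^ 2 ^ b < j := by
  apply Nat.lt_of_testBit b
  · rw [Nat.testBit_xor, Nat.testBit_two_pow]; simp [hb]
  · exact hb
  · intro c hc
    rw [Nat.testBit_xor, Nat.testBit_two_pow]
    simp [Nat.ne_of_lt hc]

lemma submask_lt {i j : Nat} (h : i ||| j = j) (hne : i ≠ j) : i < j := by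
  have h1 : i ≤ i ||| j := Nat.left_le_or
  rw [h] at h1
  exact lt_of_le_of_ne h1 hne

-- the transitivity argument: covering pairs suffice
lemma mono_of_cover (t : Nat → Int) (n : Nat)
    (h : ∀ j k, j < n → j.testBit k = true → t (j ^^^ 2 ^ k) ≤ t j) :
    ∀ j, j < n → ∀ i, i ||| j = j → i < j → t i ≤ t j := by
  intro j
  induction j using Nat.strong_induction_on with
  | _ j ih =>
    intro hjn i hsub hij
    have hne : i ≠ j := Nat.ne_of_lt hij
    have hdiff : ∃ b, i.testBit b ≠ j.testBit b := by
      by_contra hc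
      push_neg at hc
      exact hne (Nat.eq_of_testBit_eq hc)
    obtain ⟨b, hb⟩ := hdiff
    have hjb : j.testBit b = true := by
      cases hj : j.testBit b
      · cases hi : i.testBit b
        · simp [hi, hj] at hb
        · exact absurd ((or_eq_iff_testBit i j).mp hsub b hi) (by simp [hj])
      · rfl
    have hib : i.testBit b = false := by
      cases hi : i.testBit b
      · rfl
      · simp [hi, hjb] at hb
    set m := j ^^^ 2 ^ b with hm
    have hmj : m < j := xor_pow_lt hjb
    have hstep : t m ≤ t j := h j b hjn hjb
    by_cases him : i = m
    · simpa [him] using hstep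
    · have hsub' : i ||| m = m := by
        rw [or_eq_iff_testBit]
        intro c hc
        rw [hm, Nat.testBit_xor, Nat.testBit_two_pow]
        have hbc : b ≠ c := fun h' => by rw [← h'] at hc; simp [hib] at hc
        simp [hbc, (or_eq_iff_testBit i j).mp hsub c hc]
      have him' : i < m := submask_lt hsub' him
      exact le_trans (ih m hmj (lt_trans hmj hjn) i hsub' him') hstep

-- the tail-recursive builder is the MSB-first map over the bit positions
lemma fmtLoop_eq (i w : Nat) : ∀ (k : Nat) (acc : List Char),
    fmtLoop i w k acc
      = (List.range k).map (fun p => if i.testBit (w - 1 - p) then '1' else '0') ++ acc := by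
  intro k
  induction k with
  | zero => intro acc; simp [fmtLoop]
  | succ k ih =>
      intro acc
      rw [fmtLoop, ih, List.range_succ, List.map_append]
      simp [Nat.sub_sub, Nat.add_comm 1 k]

lemma pyFormatB_eq (w : Int) (i : Nat) :
    pyFormatB w i
      = (List.range w.toNat).map (fun p => if i.testBit (w.toNat - 1 - p) then '1' else '0') := by
  rw [pyFormatB, fmtLoop_eq, List.append_nil]

-- the simultaneous walk is zip-then-all
lemma zipAllLe_eq : ∀ (xs ys : List Char),
    zipAllLe xs ys = (xs.zip ys).all (fun p => p.1 ≤ p.2) := by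
  intro xs
  induction xs with
  | nil => intro ys; cases ys <;> rfl
  | cons x xs ih =>
      intro ys
      cases ys with
      | nil => rfl
      | cons y ys =>
          rw [zipAllLe, List.zip_cons_cons, List.all_cons, ih]
          by_cases h : x ≤ y <;> simp [h]

-- the formatted-string comparison is exactly the submask test (for indices below 2^w)
lemma zip_cond_iff (w i j : Nat) (hi : i < 2 ^ w) (hj : j < 2 ^ w) :
    (∀ p ∈ (pyFormatB (w : Int) i).zip (pyFormatB (w : Int) j), p.1 ≤ p.2)
      ↔ i ||| j = j := by
  have hw : ((w : Int)).toNat = w := Int.toNat_natCast w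
  have key : ∀ (bi bj : Bool), ((if bi = true then '1' else '0') ≤ (if bj = true then '1' else '0')) ↔ (bi = true → bj = true) := by decide
  rw [or_eq_iff_testBit]
  simp only [pyFormatB_eq]
  rw [hw, List.zip_map']
  simp only [List.mem_map, List.mem_range, forall_exists_index, and_imp]
  constructor
  · intro h b hb
    have hbw : b < w := by
      by_contra hc
      push_neg at hc
      rw [testBit_false_of_lt hi hc] at hb
      exact absurd hb (by simp)
    have hk : w - 1 - (w - 1 - b) = b := by omega
    have := h _ (w - 1 - b) (by omega) rfl
    rw [hk, key] at this
    exact this hb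
  · intro h p k hk hp
    subst hp
    rw [key]
    intro hik
    exact h _ hik

-- characterizations of the two ports
lemma check_M_eq_true_iff (table : List Int) (n_vars : Int) (hv : 0 ≤ n_vars)
    (hlen : table.length ≤ 2 ^ n_vars.toNat) :
    check_M table n_vars = true ↔
      ∀ i j, i < j → j < table.length → i ||| j = j → table.getD i 0 ≤ table.getD j 0 := by
  have hw : n_vars = ((n_vars.toNat : Nat) : Int) := (Int.toNat_of_nonneg hv).symm
  unfold check_M
  simp only [List.all_eq_true, List.mem_range, List.mem_range'_1, and_imp, decide_eq_true_eq]
  constructor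
  · intro h i j hij hjn hsub
    have hi : i < 2 ^ n_vars.toNat := lt_of_lt_of_le (lt_of_lt_of_le hij (Nat.le_of_lt hjn)) hlen
    have hj : j < 2 ^ n_vars.toNat := lt_of_lt_of_le hjn hlen
    have hc : ∀ p ∈ (pyFormatB n_vars i).zip (pyFormatB n_vars j), p.1 ≤ p.2 := by
      rw [hw]; exact (zip_cond_iff n_vars.toNat i j hi hj).mpr hsub
    have hc' : zipAllLe (pyFormatB n_vars i) (pyFormatB n_vars j) = true := by
      rw [zipAllLe_eq, List.all_eq_true]
      intro p hp
      exact decide_eq_true (hc p hp)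
    have := h i (by omega) j (by omega) (by omega)
    rw [if_pos hc'] at this
    simpa using this
  · intro h i hi j hj1 hj2
    split
    · rename_i hc
      have hij : i < j := by omega
      have hjn : j < table.length := by omega
      have hi2 : i < 2 ^ n_vars.toNat := lt_of_lt_of_le (lt_of_lt_of_le hij (Nat.le_of_lt hjn)) hlen
      have hj2' : j < 2 ^ n_vars.toNat := lt_of_lt_of_le hjn hlen
      rw [zipAllLe_eq, List.all_eq_true] at hc
      have hc2 : ∀ p ∈ (pyFormatB n_vars i).zip (pyFormatB n_vars j), p.1 ≤ p.2 := by
        intro p hp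
        exact of_decide_eq_true (hc p hp)
      rw [hw] at hc2
      have hsub := (zip_cond_iff n_vars.toNat i j hi2 hj2').mp hc2
      simpa using h i j hij hjn hsub
    · rfl

lemma check_M_alt_eq_true_iff (table : List Int) (n_vars : Int) :
    check_M_alt table n_vars = true ↔
      ∀ j k, j < table.length → j.testBit k = true →
        table.getD (j ^^^ 2 ^ k) 0 ≤ table.getD j 0 := by
  unfold check_M_alt
  simp only [List.all_eq_true, List.mem_range]
  constructor
  · intro h j k hjn hk
    have hks : k < Nat.size j := Nat.lt_size.mpr (Nat.ge_two_pow_of_testBit hk)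
    have := h j hjn k hks
    rw [hk] at this
    simp only [Bool.true_and, Bool.not_eq_true', decide_eq_false_iff_not, not_lt] at this
    simpa [Nat.shiftLeft_eq] using this
  · intro h j hjn k _
    cases hk : j.testBit k
    · simp
    · have := h j k hjn hk
      simp only [Bool.true_and, Bool.not_eq_true', decide_eq_false_iff_not, not_lt]
      simpa [Nat.shiftLeft_eq] using this

lemma cover_iff_all (t : Nat → Int) (n : Nat) :
    (∀ i j, i < j → j < n → i ||| j = j → t i ≤ t j) ↔
      (∀ j k, j < n → j.testBit k = true → t (j ^^^ 2 ^ k) ≤ t j) := by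
  constructor
  · intro h j k hjn hk
    exact h _ j (xor_pow_lt hk) hjn (xor_pow_submask hk)
  · intro h i j hij hjn hsub
    exact mono_of_cover t n h j hjn i hsub hij

lemma both_true_of_small (table : List Int) (n_vars : Int) (h : table.length ≤ 1) :
    check_M table n_vars = true ∧ check_M_alt table n_vars = true := by
  match table, h with
  | [], _ => constructor <;> rfl
  | [a], _ =>
      constructor
      · rfl
      · unfold check_M_alt
        simp [Nat.size_zero]

-- ===== VERDICT (by name: the statement is the Claim_ definition above) =====
theorem check_M_spec : Claim_equal_check_M := by
  intro table n_vars _ hpre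
  unfold Spec_check_M
  rcases hpre with h1 | ⟨hv, hsz⟩
  · obtain ⟨ha, hb⟩ := both_true_of_small table n_vars h1
    rw [ha, hb]
  · have hlen : table.length ≤ 2 ^ n_vars.toNat := by
      have hp : 0 < 2 ^ n_vars.toNat := Nat.two_pow_pos _
      rcases Nat.eq_zero_or_pos table.length with h0 | h0
      · omega
      · have := Nat.size_le.mp hsz
        omega
    rw [Bool.eq_iff_iff, check_M_eq_true_iff table n_vars hv hlen,
      check_M_alt_eq_true_iff table n_vars]
    exact cover_iff_all _ _
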